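-- pv_equiv track=rewrite | github.com/Diegoval-Dev/R-Lab2 | receiver-py/src/presentation.py | bits_to_ascii
-- ===== SOURCE A (Python) =====
-- from typing import List
--
-- def bits_to_ascii(bits: List[int], original_length: int = None) -> str:
--     """
--     Converts binary bits back to ASCII text.
--
--     Args:
--         bits: List of bits (0 or 1)
--         original_length: Original bit length before padding (optional)
--
--     Returns:
--         ASCII string representation
--     """
--     # If original length specified, truncate to that length
--     if original_length is not None:
--         bits = bits[:original_length]
--
--     # Pad only if necessary for byte conversion
--     working_bits = bits[:]
--     if len(working_bits) % 8 != 0: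
--         working_bits = working_bits + [0] * (8 - len(working_bits) % 8)
--
--     text = ""
--     for i in range(0, len(working_bits), 8):
--         byte_bits = working_bits[i:i+8]
--         ascii_val = 0
--         for j, bit in enumerate(byte_bits):
--             ascii_val |= bit << (7 - j)
--
--         # Only add printable ASCII characters
--         if 32 <= ascii_val <= 126:
--             text += chr(ascii_val)
--         else:
--             text += '?'  # Replace non-printable with ?
--
--     return text
-- ===== SOURCE B (Python) =====
-- def _emit(v):
--     return chr(v) if 32 <= v <= 126 else '?'
--
-- def bits_to_ascii(bits, original_length=None):
--     if original_length is not None: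
--         bits = bits[:original_length]
--     out = []
--     acc = 0
--     nbits = 0
--     for bit in bits:
--         acc |= bit << (7 - nbits)
--         nbits += 1
--         if nbits == 8:
--             out.append(_emit(acc))
--             acc = 0
--             nbits = 0
--     if nbits > 0:
--         out.append(_emit(acc))
--     return ''.join(out)
-- ===== Notes on version B (the rewrite author's own statement) =====
-- stated objective: simpler
-- what changed: A copies and zero-pads the bit list to a multiple of 8 and then runs nested loops (outer over 8-slices, inner enumerate over each slice); B makes a single streaming pass over the truncated bits with an accumulator and bit counter, flushing a character every 8 bits and once at the end, with no padded copy and no slicing.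
import Mathlib
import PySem

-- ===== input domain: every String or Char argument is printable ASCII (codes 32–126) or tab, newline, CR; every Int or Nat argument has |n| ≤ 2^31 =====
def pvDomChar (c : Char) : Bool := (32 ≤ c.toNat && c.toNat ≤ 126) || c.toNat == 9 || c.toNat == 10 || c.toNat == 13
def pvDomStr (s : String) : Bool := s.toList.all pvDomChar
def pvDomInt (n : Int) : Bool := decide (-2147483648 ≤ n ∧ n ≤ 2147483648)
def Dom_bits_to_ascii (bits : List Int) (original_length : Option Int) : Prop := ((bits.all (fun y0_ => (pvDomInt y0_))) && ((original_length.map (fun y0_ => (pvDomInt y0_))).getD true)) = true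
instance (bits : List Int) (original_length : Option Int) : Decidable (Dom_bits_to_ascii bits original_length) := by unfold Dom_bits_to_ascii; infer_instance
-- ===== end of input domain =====

-- B replaces A's pad-then-chunk nested loops (padded copy, slicing, inner enumerate loop
-- per byte) by a single streaming pass with an accumulator; objective: simpler, same cost.

-- ===== PORT A =====
-- literal transliteration of A: truncate, copy, pad to a multiple of 8, then for each
-- 8-slice OR the bits into ascii_val and append the printable char or '?'.
def bits_to_ascii (bits : List Int) (original_length : Option Int) : String :=
  let bits1 := match original_length with
    | some n => PySem.List.slice bits none (some n)
    | none => bits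
  let wb0 := PySem.List.slice bits1
  let working_bits := if wb0.length % 8 ≠ 0 then wb0 ++ List.replicate (8 - wb0.length % 8) (0:Int) else wb0
  let text := (PySem.List.pyRange 0 (working_bits.length : Int) 8).foldl
    (fun (text : List Char) (i : Int) =>
      let byte_bits := PySem.List.slice working_bits (some i) (some (i + 8))
      let ascii_val := (PySem.List.enumerate byte_bits).foldl
        (fun v jb => PySem.Int.bor v (jb.2 <<< (7 - jb.1).toNat)) 0
      if 32 ≤ ascii_val ∧ ascii_val ≤ 126 then text ++ [Char.ofNat ascii_val.toNat]
      else text ++ ['?']) []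
  String.ofList text

-- ===== PORT B =====
-- chr(v) if 32 <= v <= 126 else '?'
def pvEmit (v : Int) : Char := if 32 ≤ v ∧ v ≤ 126 then Char.ofNat v.toNat else '?'

-- literal transliteration of B (Source B): one pass, acc |= bit << (7 - nbits), flush every 8
-- bits and once more at the end if bits are left over.
def bits_to_ascii_alt (bits : List Int) (original_length : Option Int) : String :=
  let bs := match original_length with
    | some n => PySem.List.slice bits none (some n)
    | none => bits
  let s := bs.foldl
    (fun (s : List Char × Int × Nat) (bit : Int) =>
      let acc := PySem.Int.bor s.2.1 (bit <<< (7 - s.2.2))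
      let nbits := s.2.2 + 1
      if nbits = 8 then (s.1 ++ [pvEmit acc], (0:Int), (0:Nat)) else (s.1, acc, nbits))
    (([] : List Char), (0:Int), (0:Nat))
  String.ofList (if s.2.2 > 0 then s.1 ++ [pvEmit s.2.1] else s.1)

-- ===== PRECONDITION & SPEC =====
def Spec_bits_to_ascii (bits : List Int) (original_length : Option Int) (out : String) : Prop := out = bits_to_ascii_alt bits original_length
instance (bits : List Int) (original_length : Option Int) (out : String) : Decidable (Spec_bits_to_ascii bits original_length out) := by unfold Spec_bits_to_ascii; infer_instance

-- ===== CLAIM (what is proved, stated in full; the proofs are below) =====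
def Claim_equal_bits_to_ascii : Prop := ∀ (bits : List Int) (original_length : Option Int), Dom_bits_to_ascii bits original_length → Spec_bits_to_ascii bits original_length (bits_to_ascii bits original_length)

-- ===== LEMMAS AND PROOFS =====

-- A's padded working list, as the same expression A's port uses.
def pvPad (l : List Int) : List Int :=
  if l.length % 8 ≠ 0 then l ++ List.replicate (8 - l.length % 8) (0:Int) else l

-- A's inner loop: the byte value, then the emitted character.
def pvByteVal (byte : List Int) : Int :=
  (PySem.List.enumerate byte).foldl (fun v jb => PySem.Int.bor v (jb.2 <<< (7 - jb.1).toNat)) 0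

def pvEmitByte (byte : List Int) : Char := pvEmit (pvByteVal byte)

-- The characters A's outer loop produces: k chunks of 8 taken off the front.
def pvChunks : Nat → List Int → List Char
  | 0, _ => []
  | k+1, l => pvEmitByte (l.take 8) :: pvChunks k (l.drop 8)

theorem pvPad_length (l : List Int) : (pvPad l).length = 8 * ((l.length + 7) / 8) := by
  unfold pvPad
  split_ifs with h
  · simp only [List.length_append, List.length_replicate]; omega
  · omega

theorem pvIf_emit (t : List Char) (v : Int) :
    (if 32 ≤ v ∧ v ≤ 126 then t ++ [Char.ofNat v.toNat] else t ++ ['?']) = t ++ [pvEmit v] := by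
  unfold pvEmit; split_ifs <;> rfl

theorem pvPad_cons8 (b0 b1 b2 b3 b4 b5 b6 b7 : Int) (rest : List Int) :
    pvPad (b0::b1::b2::b3::b4::b5::b6::b7::rest)
    = b0::b1::b2::b3::b4::b5::b6::b7::pvPad rest := by
  unfold pvPad
  simp only [List.length_cons]
  have h : (rest.length + 1+1+1+1+1+1+1+1) % 8 = rest.length % 8 := by omega
  rw [h]
  split_ifs with hc
  · simp
  · rfl

theorem pvChunks_cons8 (k : Nat) (b0 b1 b2 b3 b4 b5 b6 b7 : Int) (rest : List Int) :
    pvChunks (k+1) (b0::b1::b2::b3::b4::b5::b6::b7::rest)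
    = pvEmitByte [b0,b1,b2,b3,b4,b5,b6,b7] :: pvChunks k rest := rfl

theorem pvSlice_none_none {α : Type} (l : List α) : PySem.List.slice l none none = l := by
  simp [PySem.List.slice]

theorem pyRange8_nil (i n : Nat) (h : n ≤ i) : PySem.List.pyRange (i:Int) (n:Int) 8 = [] := by
  rw [PySem.List.pyRange_of_pos _ _ (by norm_num)]
  have : ¬ ((i:Int) < (n:Int)) := by exact_mod_cast not_lt.mpr h
  simp [this]

theorem pvCount_eq (i n : Nat) (h : i < n) :
    (((n:Int) - i + 8 - 1)/8).toNat = (n - i + 7)/8 := by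
  have h2 : ((n:Int) - i + 8 - 1) = ((n - i + 7 : Nat) : Int) := by push_cast; omega
  have h3 : ((n - i + 7 : Nat) : Int)/(8:Int) = (((n - i + 7)/8 : Nat) : Int) := by
    exact_mod_cast (Int.natCast_div (n-i+7) 8).symm
  rw [h2, h3, Int.toNat_natCast]

theorem pyRange8_cons (i n : Nat) (h : i + 8 ≤ n) :
    PySem.List.pyRange (i:Int) (n:Int) 8 = (i:Int) :: PySem.List.pyRange ((i+8 : Nat) : Int) (n:Int) 8 := by
  rw [PySem.List.pyRange_of_pos _ _ (by norm_num), PySem.List.pyRange_of_pos _ _ (by norm_num)]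
  have h1 : ((i:Int) < n) := by exact_mod_cast (by omega : i < n)
  rw [if_pos h1, pvCount_eq i n (by omega)]
  by_cases h4 : (i + 8 : Nat) < n
  · have h4' : (((i+8:Nat):Int) < n) := by exact_mod_cast h4
    rw [if_pos h4', pvCount_eq (i+8) n h4]
    have hc : (n - i + 7)/8 = (n - (i+8) + 7)/8 + 1 := by omega
    rw [hc, List.range_succ_eq_map]
    simp only [List.map_cons, Nat.cast_zero, mul_zero, add_zero, List.map_map]
    congr 1
    refine List.map_congr_left (fun a _ => ?_)
    simp only [Function.comp_apply]
    push_cast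
    ring
  · have h4' : ¬ (((i+8:Nat):Int) < n) := by exact_mod_cast h4
    rw [if_neg h4']
    have hn : n = i + 8 := by omega
    subst hn
    have hc : (i + 8 - i + 7)/8 = 1 := by omega
    rw [hc]
    simp

-- A's outer loop over range(i, len(wb), 8) yields the chunk characters of wb.drop i.
theorem pvLoopA (wb : List Int) (k : Nat) : ∀ (i : Nat) (t : List Char),
    wb.length = i + 8*k →
    (PySem.List.pyRange (i:Int) (wb.length : Int) 8).foldl
      (fun (text : List Char) (i : Int) =>
        let byte_bits := PySem.List.slice wb (some i) (some (i + 8))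
        let ascii_val := (PySem.List.enumerate byte_bits).foldl
          (fun v jb => PySem.Int.bor v (jb.2 <<< (7 - jb.1).toNat)) 0
        if 32 ≤ ascii_val ∧ ascii_val ≤ 126 then text ++ [Char.ofNat ascii_val.toNat]
        else text ++ ['?']) t
    = t ++ pvChunks k (wb.drop i) := by
  induction k with
  | zero =>
    intro i t h
    rw [pyRange8_nil i wb.length (by omega)]
    simp [pvChunks]
  | succ k ih =>
    intro i t h
    rw [pyRange8_cons i wb.length (by omega), List.foldl_cons]
    have hcast : ((i:Int) + 8) = ((i + 8 : Nat) : Int) := by push_cast; ring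
    have hslice : PySem.List.slice wb (some (i:Int)) (some ((i:Int) + 8))
        = (wb.drop i).take 8 := by
      rw [hcast, PySem.List.slice_natCast]
      congr 1
      omega
    simp only [hslice]
    rw [ih (i+8) _ (by omega)]
    rw [pvIf_emit]
    have hd : wb.drop (i+8) = (wb.drop i).drop 8 := (List.drop_drop).symm
    obtain ⟨c0, c1, c2, c3, c4, c5, c6, c7, r, hr⟩ :
        ∃ c0 c1 c2 c3 c4 c5 c6 c7 r,
          wb.drop i = c0::c1::c2::c3::c4::c5::c6::c7::r := by
      have hlen : 8 ≤ (wb.drop i).length := by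
        simp only [List.length_drop]; omega
      match hm : wb.drop i with
      | c0::c1::c2::c3::c4::c5::c6::c7::r => exact ⟨c0,c1,c2,c3,c4,c5,c6,c7,r,rfl⟩
      | [] | [_] | [_,_] | [_,_,_] | [_,_,_,_] | [_,_,_,_,_] | [_,_,_,_,_,_] | [_,_,_,_,_,_,_] =>
        rw [hm] at hlen; simp at hlen
    rw [hd, hr]
    simp [pvChunks, pvEmitByte, pvByteVal]
  
-- B's end-of-loop flush.
def pvFinish (s : List Char × Int × Nat) : List Char :=
  if s.2.2 > 0 then s.1 ++ [pvEmit s.2.1] else s.1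

-- B's loop step.
def pvStep (s : List Char × Int × Nat) (bit : Int) : List Char × Int × Nat :=
  let acc := PySem.Int.bor s.2.1 (bit <<< (7 - s.2.2))
  let nbits := s.2.2 + 1
  if nbits = 8 then (s.1 ++ [pvEmit acc], (0:Int), (0:Nat)) else (s.1, acc, nbits)

-- Eight steps of B from a flushed state emit exactly one byte character and flush again.
theorem pvStep8 (b0 b1 b2 b3 b4 b5 b6 b7 : Int) (rest : List Int) (out : List Char) :
    (b0::b1::b2::b3::b4::b5::b6::b7::rest).foldl pvStep (out, (0:Int), (0:Nat))
    = rest.foldl pvStep (out ++ [pvEmitByte [b0,b1,b2,b3,b4,b5,b6,b7]], (0:Int), (0:Nat)) := by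
  simp [pvStep, pvEmitByte, pvByteVal, PySem.List.enumerate]

-- B's streaming pass, started on a flushed accumulator, produces the chunk characters of
-- the padded list.
theorem pvMainB : ∀ (l : List Int) (out : List Char),
    pvFinish (l.foldl pvStep (out, (0:Int), (0:Nat)))
    = out ++ pvChunks ((l.length + 7)/8) (pvPad l)
  | [], out => by
    simp [pvFinish, pvChunks, pvPad]
  | [b0], out => by
    simp [pvFinish, pvStep, pvChunks, pvPad, pvEmitByte, pvByteVal,
      PySem.List.enumerate, List.replicate]
  | [b0,b1], out => by
    simp [pvFinish, pvStep, pvChunks, pvPad, pvEmitByte, pvByteVal,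
      PySem.List.enumerate, List.replicate]
  | [b0,b1,b2], out => by
    simp [pvFinish, pvStep, pvChunks, pvPad, pvEmitByte, pvByteVal,
      PySem.List.enumerate, List.replicate]
  | [b0,b1,b2,b3], out => by
    simp [pvFinish, pvStep, pvChunks, pvPad, pvEmitByte, pvByteVal,
      PySem.List.enumerate, List.replicate]
  | [b0,b1,b2,b3,b4], out => by
    simp [pvFinish, pvStep, pvChunks, pvPad, pvEmitByte, pvByteVal,
      PySem.List.enumerate, List.replicate]
  | [b0,b1,b2,b3,b4,b5], out => by
    simp [pvFinish, pvStep, pvChunks, pvPad, pvEmitByte, pvByteVal,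
      PySem.List.enumerate, List.replicate]
  | [b0,b1,b2,b3,b4,b5,b6], out => by
    simp [pvFinish, pvStep, pvChunks, pvPad, pvEmitByte, pvByteVal,
      PySem.List.enumerate]
  | b0::b1::b2::b3::b4::b5::b6::b7::rest, out => by
    rw [pvStep8, pvMainB rest (out ++ [pvEmitByte [b0,b1,b2,b3,b4,b5,b6,b7]])]
    rw [pvPad_cons8]
    simp only [List.length_cons]
    have hcount : (rest.length + 1+1+1+1+1+1+1+1 + 7)/8 = (rest.length + 7)/8 + 1 := by omega
    rw [hcount, pvChunks_cons8]
    simp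

theorem pvKey (l : List Int) : bits_to_ascii l none = bits_to_ascii_alt l none := by
  unfold bits_to_ascii bits_to_ascii_alt
  simp only [pvSlice_none_none]
  show String.ofList ((PySem.List.pyRange 0 ((pvPad l).length : Int) 8).foldl
      (fun (text : List Char) (i : Int) =>
        let byte_bits := PySem.List.slice (pvPad l) (some i) (some (i + 8))
        let ascii_val := (PySem.List.enumerate byte_bits).foldl
          (fun v jb => PySem.Int.bor v (jb.2 <<< (7 - jb.1).toNat)) 0
        if 32 ≤ ascii_val ∧ ascii_val ≤ 126 then text ++ [Char.ofNat ascii_val.toNat]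
        else text ++ ['?']) [])
    = String.ofList (pvFinish (l.foldl pvStep ([], (0:Int), (0:Nat))))
  have hA := pvLoopA (pvPad l) ((l.length + 7)/8) 0 []
    (by rw [pvPad_length]; omega)
  simp only [Nat.cast_zero, List.drop_zero, List.nil_append] at hA
  rw [hA, pvMainB l []]
  simp

-- ===== VERDICT (by name: the statement is the Claim_ definition above) =====
theorem bits_to_ascii_spec : Claim_equal_bits_to_ascii := by
  intro bits ol _
  unfold Spec_bits_to_ascii
  cases ol with
  | none => exact pvKey bits
  | some n => exact pvKey (PySem.List.slice bits none (some n))
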